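-- pv_equiv track=rewrite | github.com/Palmirka/Evolutionary-checkers | tests/preparation/masking_test.py | generate_result_usage
-- ===== SOURCE A (Python) =====
-- def generate_result_usage(dictionary):
--     result = {idx: 0 for idx in range(64)}
--     for key, value in dictionary.items():
--         for _ in range(len(value)):
--             for result_key in result.keys():
--                 result[result_key] <<= 1
--                 if result_key in key:
--                     result[result_key] += 1
--     return result
-- ===== SOURCE B (Python) =====
-- def generate_result_usage(dictionary):
--     # Per (key, value) pair: shift by len(value) at once and add the mask
--     # (1 << len(value)) - 1 when the bit-index is a member of key, instead of
--     # one shift-and-add per element of value per result key.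
--     sizes = [(key, len(value)) for key, value in dictionary.items()]
--     result = {}
--     for k in range(64):
--         acc = 0
--         for key, size in sizes:
--             acc = (acc << size) + ((1 << size) - 1 if k in key else 0)
--         result[k] = acc
--     return result
-- ===== Notes on version B (the rewrite author's own statement) =====
-- stated objective: faster
-- what changed: Inverts the loop nesting: instead of shifting all 64 accumulators by one bit for every single element of every value list, B processes each (key, value) pair once per bit-index, shifting by len(value) in one step and adding the mask (1<<len(value))-1 on membership.
import Mathlib
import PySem

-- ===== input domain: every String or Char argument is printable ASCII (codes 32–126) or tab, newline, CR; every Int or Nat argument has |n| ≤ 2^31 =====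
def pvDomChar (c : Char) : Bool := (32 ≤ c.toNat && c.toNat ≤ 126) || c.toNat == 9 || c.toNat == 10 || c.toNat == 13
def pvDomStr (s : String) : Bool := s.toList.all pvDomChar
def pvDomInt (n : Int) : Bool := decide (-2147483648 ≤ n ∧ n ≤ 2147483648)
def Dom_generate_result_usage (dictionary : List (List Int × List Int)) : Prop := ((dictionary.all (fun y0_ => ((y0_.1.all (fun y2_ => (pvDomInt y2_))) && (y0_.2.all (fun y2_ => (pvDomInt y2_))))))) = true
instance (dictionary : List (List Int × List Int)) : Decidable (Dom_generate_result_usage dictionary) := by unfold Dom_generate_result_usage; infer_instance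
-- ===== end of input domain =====

-- ===== PORT A =====
-- B inverts A's loop nesting: one shift by len(value) plus a mask per (key, value) pair
-- and bit-index, instead of one shift per element of every value list (objective: faster).
-- 'Int.shiftLeft a n' is Python's 'a << n' (n ≥ 0 here). The dict argument arrives as an
-- association list; 'PySem.Dict.ofList' rebuilds Python's dict (last value, first position).
def generate_result_usage (dictionary : List (List Int × List Int)) : List (Int × Int) :=
  let result : List (Int × Int) := (PySem.List.pyRange 0 64 1).map (fun idx => (idx, (0 : Int)))
  ((PySem.Dict.ofList dictionary).items).foldl
    (fun result kv =>
      (List.range kv.2.length).foldl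
        (fun (r : List (Int × Int)) (_ : Nat) =>
          -- for result_key in result.keys(): result[result_key] <<= 1; if result_key in key: += 1
          r.map (fun p => (p.1, Int.shiftLeft p.2 1 + (if p.1 ∈ kv.1 then 1 else 0))))
        result)
    result

-- ===== PORT B =====
def generate_result_usage_alt (dictionary : List (List Int × List Int)) : List (Int × Int) :=
  let sizes := ((PySem.Dict.ofList dictionary).items).map (fun kv => (kv.1, kv.2.length))
  (PySem.List.pyRange 0 64 1).map (fun k =>
    (k, sizes.foldl
      (fun acc p => Int.shiftLeft acc p.2 + (if k ∈ p.1 then Int.shiftLeft 1 p.2 - 1 else 0))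
      0))

-- ===== PRECONDITION & SPEC =====
def Spec_generate_result_usage (dictionary : List (List Int × List Int)) (out : List (Int × Int)) : Prop := out = generate_result_usage_alt dictionary
instance (dictionary : List (List Int × List Int)) (out : List (Int × Int)) : Decidable (Spec_generate_result_usage dictionary out) := by unfold Spec_generate_result_usage; infer_instance

-- ===== CLAIM (what is proved, stated in full; the proofs are below) =====
def Claim_equal_generate_result_usage : Prop := ∀ (dictionary : List (List Int × List Int)), Dom_generate_result_usage dictionary → Spec_generate_result_usage dictionary (generate_result_usage dictionary)

-- ===== LEMMAS AND PROOFS =====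

-- Python's '<<' on Int (cited: Int.shiftLeft_eq).
lemma shl_eq (a : Int) (n : Nat) : Int.shiftLeft a n = a * 2 ^ n := Int.shiftLeft_eq a n

-- Inner loop of A: repeating "shift all entries by one bit and add the membership bit"
-- n times multiplies each entry by 2^n and adds the n-bit membership mask.
lemma inner_eq (key : List Int) (n : Nat) (r : List (Int × Int)) :
    (List.range n).foldl
      (fun (r : List (Int × Int)) (_ : Nat) =>
        r.map (fun p => (p.1, Int.shiftLeft p.2 1 + (if p.1 ∈ key then 1 else 0)))) r
    = r.map (fun p => (p.1, p.2 * 2 ^ n + (if p.1 ∈ key then 2 ^ n - 1 else 0))) := by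
  induction n generalizing r with
  | zero => simp
  | succ n ih =>
    rw [List.range_succ, List.foldl_append, ih]
    simp only [List.foldl_cons, List.foldl_nil, List.map_map]
    apply List.map_congr_left
    intro p _
    simp only [Function.comp, shl_eq]
    by_cases h : p.1 ∈ key <;> simp [h, pow_succ] <;> ring

-- Outer loop of A, characterised entrywise: every entry folds independently.
lemma outer_eq (items : List (List Int × List Int)) (r : List (Int × Int)) :
    items.foldl
      (fun result kv =>
        (List.range kv.2.length).foldl
          (fun (r : List (Int × Int)) (_ : Nat) =>
            r.map (fun p => (p.1, Int.shiftLeft p.2 1 + (if p.1 ∈ kv.1 then 1 else 0))))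
          result) r
    = r.map (fun p => (p.1,
        items.foldl
          (fun acc kv => acc * 2 ^ kv.2.length + (if p.1 ∈ kv.1 then 2 ^ kv.2.length - 1 else 0))
          p.2)) := by
  induction items generalizing r with
  | nil => simp
  | cons kv t ih =>
    simp only [List.foldl_cons]
    rw [inner_eq, ih, List.map_map]
    apply List.map_congr_left
    intro p _
    simp [Function.comp]

theorem generate_result_usage_sub : ∀ (dictionary : List (List Int × List Int)),
    generate_result_usage dictionary = generate_result_usage_alt dictionary := by
  intro d
  unfold generate_result_usage generate_result_usage_alt
  rw [outer_eq, List.map_map]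
  apply List.map_congr_left
  intro k _
  simp [Function.comp, shl_eq, List.foldl_map]

-- ===== VERDICT (by name: the statement is the Claim_ definition above) =====
theorem generate_result_usage_spec : Claim_equal_generate_result_usage := by
  intro d _
  exact (generate_result_usage_sub d).symm ▸ rfl
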